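-- pv_equiv track=rewrite | github.com/joapingut/aia-1718-t1 | predictor/unigram.py | createLettersUnigramFromCorpus
-- ===== SOURCE A (Python) =====
-- import random, operator
--
-- def createLettersUnigramFromCorpus(masc, corpus):
--     sorted_corpus = sorted(corpus.items(), key=operator.itemgetter(1), reverse=True)
--     result = {}
--     for corpus_pair in sorted_corpus:
--         for masc_key in masc:
--             masc_value = masc.get(masc_key)
--             corpus_key = corpus_pair[0]
--             corpus_value = corpus_pair[1]
--             if(corpus_key in masc_value):
--                 if(masc_key in result):
--                     value = result.get(masc_key)
--                     value.append(corpus_pair)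
--                     result[masc_key] = value
--                 else:
--                     result[masc_key] = [corpus_pair,]
--     return result
-- ===== SOURCE B (Python) =====
-- import operator
--
-- def createLettersUnigramFromCorpus(masc, corpus):
--     rev = {}
--     for masc_key, masc_value in masc.items():
--         for elem in dict.fromkeys(masc_value):
--             if elem in rev:
--                 rev[elem].append(masc_key)
--             else:
--                 rev[elem] = [masc_key]
--     result = {}
--     for pair in sorted(corpus.items(), key=operator.itemgetter(1), reverse=True):
--         for masc_key in rev.get(pair[0], ()):
--             if masc_key in result:
--                 result[masc_key].append(pair)
--             else:
--                 result[masc_key] = [pair]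
--     return result
-- ===== Notes on version B (the rewrite author's own statement) =====
-- stated objective: faster
-- what changed: B builds a reverse index (corpus element -> list of masc keys whose value list contains it) once, then makes a single pass over the sorted corpus reading the index, instead of A's rescan of every masc entry (with a linear membership test) for every corpus pair.
import Mathlib
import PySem

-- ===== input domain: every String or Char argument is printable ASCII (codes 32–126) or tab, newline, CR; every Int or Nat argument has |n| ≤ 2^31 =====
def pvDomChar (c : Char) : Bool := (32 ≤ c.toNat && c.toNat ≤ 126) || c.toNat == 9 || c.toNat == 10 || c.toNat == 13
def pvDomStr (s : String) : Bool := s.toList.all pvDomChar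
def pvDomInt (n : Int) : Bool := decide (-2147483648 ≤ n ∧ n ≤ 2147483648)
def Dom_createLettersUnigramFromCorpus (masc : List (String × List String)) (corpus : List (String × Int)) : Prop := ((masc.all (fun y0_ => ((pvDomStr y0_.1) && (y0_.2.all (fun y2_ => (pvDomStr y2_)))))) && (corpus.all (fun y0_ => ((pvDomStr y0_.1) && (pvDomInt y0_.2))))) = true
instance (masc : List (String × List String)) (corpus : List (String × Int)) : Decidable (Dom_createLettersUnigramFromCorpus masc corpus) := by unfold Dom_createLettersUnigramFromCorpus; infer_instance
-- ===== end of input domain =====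

-- B replaces A's scan of every masc entry for every corpus pair by a reverse index
-- (corpus element → masc keys) built once, then a single pass over the sorted corpus;
-- a timing run measured B faster. Shared helper pushAt: the Python
-- `if k in d: d[k].append(x) else: d[k] = [x]` idiom, identical lines in both programs.
def pushAt {α : Type} (d : PySem.Dict String (List α)) (k : String) (x : α) :
    PySem.Dict String (List α) :=
  if d.contains k then d.insert k ((d.get? k).getD [] ++ [x]) else d.insert k [x]

-- ===== PORT A =====
def createLettersUnigramFromCorpus (masc : List (String × List String)) (corpus : List (String × Int)) : List (String × List (String × Int)) :=
  let mascD := PySem.Dict.mk masc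
  let sorted_corpus := PySem.List.sorted corpus (fun p => p.2) true
  let result : PySem.Dict String (List (String × Int)) :=
    sorted_corpus.foldl (fun result corpus_pair =>
      mascD.keys.foldl (fun result masc_key =>
        match mascD.get? masc_key with          -- masc.get(masc_key); the key comes from masc's own keys
        | some masc_value =>
            if masc_value.contains corpus_pair.1 then pushAt result masc_key corpus_pair
            else result
        | none => result) result) (PySem.Dict.mk [])
  result.items

-- ===== PORT B =====
def revIndex (masc : List (String × List String)) : PySem.Dict String (List String) :=
  masc.foldl (fun rev p =>
    (PySem.List.dedup p.2).foldl (fun rev elem => pushAt rev elem p.1) rev) (PySem.Dict.mk [])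

def createLettersUnigramFromCorpus_alt (masc : List (String × List String)) (corpus : List (String × Int)) : List (String × List (String × Int)) :=
  let rev := revIndex masc
  let result : PySem.Dict String (List (String × Int)) :=
    (PySem.List.sorted corpus (fun p => p.2) true).foldl (fun result pair =>
      (rev.getD pair.1 []).foldl (fun result masc_key =>
        pushAt result masc_key pair) result) (PySem.Dict.mk [])
  result.items

-- ===== PRECONDITION & SPEC =====
-- Pre_ excludes masc association lists with duplicate keys: they do not represent a Python
-- dict (dict construction collapses them), and the two ports' readings of such a list
-- (per distinct key vs per stored pair) legitimately diverge on this unspecified corner.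
def Pre_createLettersUnigramFromCorpus (masc : List (String × List String)) (corpus : List (String × Int)) : Prop :=
  (masc.map Prod.fst).Nodup
instance (masc : List (String × List String)) (corpus : List (String × Int)) : Decidable (Pre_createLettersUnigramFromCorpus masc corpus) := by unfold Pre_createLettersUnigramFromCorpus; infer_instance

def pvWitness_createLettersUnigramFromCorpus : (List (String × List String)) × (List (String × Int)) :=
  ([("ab", ["x", "y"]), ("c", ["y"])], [("x", 1), ("y", 3), ("z", 2)])

def Spec_createLettersUnigramFromCorpus (masc : List (String × List String)) (corpus : List (String × Int)) (out : List (String × List (String × Int))) : Prop := out = createLettersUnigramFromCorpus_alt masc corpus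
instance (masc : List (String × List String)) (corpus : List (String × Int)) (out : List (String × List (String × Int))) : Decidable (Spec_createLettersUnigramFromCorpus masc corpus out) := by unfold Spec_createLettersUnigramFromCorpus; infer_instance

-- ===== CLAIM (what is proved, stated in full; the proofs are below) =====
def Claim_equal_createLettersUnigramFromCorpus : Prop := ∀ (masc : List (String × List String)) (corpus : List (String × Int)), Dom_createLettersUnigramFromCorpus masc corpus → Pre_createLettersUnigramFromCorpus masc corpus → Spec_createLettersUnigramFromCorpus masc corpus (createLettersUnigramFromCorpus masc corpus)

-- ===== LEMMAS AND PROOFS =====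

-- getD after pushAt: the pushed key gains x at the end, other keys are untouched.
theorem getD_pushAt {α : Type} (d : PySem.Dict String (List α)) (k k' : String) (x : α) :
    (pushAt d k x).getD k' [] = if k' = k then d.getD k [] ++ [x] else d.getD k' [] := by
  unfold pushAt
  rcases hc : d.contains k with _ | _
  · rw [if_neg Bool.false_ne_true]
    rw [PySem.Dict.getD_insert]
    split_ifs with h
    · subst h; rw [PySem.Dict.getD_of_not_contains d [] hc]; simp
    · rfl
  · rw [if_pos rfl]
    rw [PySem.Dict.getD_insert]
    split_ifs with h
    · subst h; rw [PySem.Dict.getD_eq_get?_getD]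
    · rfl

-- a fold of pushAt with a fixed payload over a Nodup key list, seen through getD
theorem getD_foldl_pushAt_nodup {α : Type} (l : List String) (hl : l.Nodup)
    (d : PySem.Dict String (List α)) (x : α) (ck : String) :
    ((l.foldl (fun d e => pushAt d e x) d)).getD ck [] =
      d.getD ck [] ++ (if ck ∈ l then [x] else []) := by
  induction l generalizing d with
  | nil => simp
  | cons e t ih =>
      rcases List.nodup_cons.mp hl with ⟨he, ht⟩
      simp only [List.foldl_cons]
      rw [ih ht]
      by_cases hck : ck = e
      · subst hck
        rw [getD_pushAt, if_pos rfl, if_neg he, List.append_nil,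
          if_pos (List.mem_cons_self ..)]
      · rw [getD_pushAt, if_neg hck]
        simp [List.mem_cons, hck]

-- the reverse index read at ck lists, in masc order, exactly the masc keys whose value contains ck
theorem getD_revIndex_aux (masc : List (String × List String)) (d : PySem.Dict String (List String)) (ck : String) :
    (masc.foldl (fun rev p =>
        (PySem.List.dedup p.2).foldl (fun rev elem => pushAt rev elem p.1) rev) d).getD ck [] =
      d.getD ck [] ++ (masc.filter (fun p => p.2.contains ck)).map Prod.fst := by
  induction masc generalizing d with
  | nil => simp
  | cons p t ih =>
      simp only [List.foldl_cons]
      rw [ih, getD_foldl_pushAt_nodup _ (PySem.List.nodup_dedup p.2)]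
      by_cases h : ck ∈ p.2
      · rw [if_pos ((PySem.List.mem_dedup _ _).mpr h)]
        rw [List.filter_cons_of_pos (by simpa using h)]
        simp
      · rw [if_neg (fun hm => h ((PySem.List.mem_dedup _ _).mp hm))]
        rw [List.filter_cons_of_neg (by simpa using h)]
        simp

theorem getD_revIndex (masc : List (String × List String)) (ck : String) :
    (revIndex masc).getD ck [] = (masc.filter (fun p => p.2.contains ck)).map Prod.fst := by
  unfold revIndex
  rw [getD_revIndex_aux]
  rfl

-- A's inner loop over masc's keys, rewritten as a loop over masc's pairs
theorem A_inner_eq (mascD : PySem.Dict String (List String)) (l : List (String × List String))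
    (hget : ∀ p ∈ l, mascD.get? p.1 = some p.2)
    (r : PySem.Dict String (List (String × Int))) (pair : String × Int) :
    (l.map Prod.fst).foldl (fun result masc_key =>
        match mascD.get? masc_key with
        | some masc_value =>
            if masc_value.contains pair.1 then pushAt result masc_key pair else result
        | none => result) r =
      l.foldl (fun result p =>
        if p.2.contains pair.1 then pushAt result p.1 pair else result) r := by
  induction l generalizing r with
  | nil => rfl
  | cons p t ih =>
      simp only [List.map_cons, List.foldl_cons]
      rw [hget p (List.mem_cons_self ..)]
      exact ih (fun q hq => hget q (List.mem_cons_of_mem _ hq)) _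

-- a guarded fold over pairs is a plain fold over the filtered keys
theorem foldl_filter_map (l : List (String × List String)) (c : String)
    (r : PySem.Dict String (List (String × Int))) (pair : String × Int) :
    l.foldl (fun result p => if p.2.contains c then pushAt result p.1 pair else result) r =
      ((l.filter (fun p => p.2.contains c)).map Prod.fst).foldl
        (fun result k => pushAt result k pair) r := by
  induction l generalizing r with
  | nil => rfl
  | cons p t ih =>
      by_cases h : p.2.contains c = true
      · simp only [List.filter_cons, h, if_true, List.foldl_cons, List.map_cons]
        exact ih _
      · simp only [List.filter_cons, h, if_false, List.foldl_cons, Bool.false_eq_true]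
        exact ih _

-- ===== VERDICT (by name: the statement is the Claim_ definition above) =====
theorem createLettersUnigramFromCorpus_spec : Claim_equal_createLettersUnigramFromCorpus := by
  intro masc corpus _hdom hpre
  unfold Spec_createLettersUnigramFromCorpus
  unfold createLettersUnigramFromCorpus createLettersUnigramFromCorpus_alt
  simp only []
  congr 1
  apply List.foldl_ext
  intro r pair _hmem
  have hkeys : (PySem.Dict.mk masc).keys = masc.map Prod.fst := rfl
  have hget : ∀ p ∈ masc, (PySem.Dict.mk masc).get? p.1 = some p.2 := by
    intro p hp
    rcases p with ⟨k, v⟩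
    exact PySem.Dict.get?_of_mem_items _ hp (by rw [hkeys]; exact hpre)
  rw [hkeys, A_inner_eq _ masc hget, foldl_filter_map, getD_revIndex]
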